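-- pv_equiv track=rewrite | github.com/yutao-li/leetcode | Configuring Project Management.py | configureProjectPresentation
-- ===== SOURCE A (Python) =====
-- from collections import defaultdict
--
-- def configureProjectPresentation(n, friendships):
--     # Write your code here
--     fs = defaultdict(set)
--     for i, j in friendships:
--         fs[i].add(j)
--         fs[j].add(i)
--     res = set(fs[1])
--     if 2 in res:
--         res.remove(2)
--     res -= fs[2]
--     for i in fs[2]:
--         if i != 1:
--             res -= fs[i]
--     if res:
--         return sorted(res)
--     else:
--         return [-1]
-- ===== SOURCE B (Python) =====
-- def configureProjectPresentation(n, friendships):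
--     f1 = {b for a, b in friendships if a == 1} | {a for a, b in friendships if b == 1}
--     f2 = {b for a, b in friendships if a == 2} | {a for a, b in friendships if b == 2}
--     forbidden = set()
--     for a, b in friendships:
--         if a in f2 and a != 1:
--             forbidden.add(b)
--         if b in f2 and b != 1:
--             forbidden.add(a)
--     res = f1 - f2 - forbidden - {2}
--     return sorted(res) if res else [-1]
-- ===== Notes on version B (the rewrite author's own statement) =====
-- stated objective: alternative
-- what changed: B drops A's defaultdict adjacency map and its sequence of in-place set subtractions: it computes the neighbor sets of 1 and 2 directly from the edge list, builds the forbidden set in one extra pass over the edges, and takes a single set difference.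
import Mathlib
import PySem

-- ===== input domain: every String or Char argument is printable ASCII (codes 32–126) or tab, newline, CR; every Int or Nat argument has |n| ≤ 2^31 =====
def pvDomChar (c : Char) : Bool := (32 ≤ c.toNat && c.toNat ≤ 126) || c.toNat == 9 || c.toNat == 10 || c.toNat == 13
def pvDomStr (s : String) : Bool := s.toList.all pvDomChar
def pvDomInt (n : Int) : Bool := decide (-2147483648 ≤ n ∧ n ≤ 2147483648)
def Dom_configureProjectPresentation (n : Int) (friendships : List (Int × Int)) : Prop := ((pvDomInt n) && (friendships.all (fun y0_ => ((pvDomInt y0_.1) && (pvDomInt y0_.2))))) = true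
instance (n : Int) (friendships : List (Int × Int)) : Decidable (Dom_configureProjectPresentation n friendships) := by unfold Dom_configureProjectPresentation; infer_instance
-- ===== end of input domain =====

-- B replaces A's adjacency dict + incremental in-place set subtractions by two direct edge-list
-- passes (neighbor sets of 1 and 2, then one forbidden set) and a single set difference (objective: alternative).

-- ===== PORT A =====
-- loop body of the defaultdict(set) adjacency build: fs[i].add(j); fs[j].add(i)
def pvStep (fs : PySem.Dict Int (PySem.Set Int)) (p : Int × Int) : PySem.Dict Int (PySem.Set Int) :=
  (fs.modify p.1 PySem.Set.empty (fun s => PySem.Set.add s p.2)).modify p.2 PySem.Set.empty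
    (fun s => PySem.Set.add s p.1)

def configureProjectPresentation (n : Int) (friendships : List (Int × Int)) : List Int :=
  let fs := friendships.foldl pvStep PySem.Dict.empty
  let res := PySem.Set.ofList (fs.getD 1 PySem.Set.empty)
  let res := if PySem.Set.contains res 2 then PySem.Set.discard res 2 else res
  let res := PySem.Set.diff res (fs.getD 2 PySem.Set.empty)
  let res := (fs.getD 2 PySem.Set.empty).foldl
    (fun r i => if i ≠ 1 then PySem.Set.diff r (fs.getD i PySem.Set.empty) else r) res
  if res ≠ [] then PySem.List.sorted res (fun x => x) false else [-1]

-- ===== PORT B =====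
def configureProjectPresentation_alt (n : Int) (friendships : List (Int × Int)) : List Int :=
  let f1 := PySem.Set.union
    (PySem.Set.ofList ((friendships.filter (fun p => p.1 == 1)).map (fun p => p.2)))
    ((friendships.filter (fun p => p.2 == 1)).map (fun p => p.1))
  let f2 := PySem.Set.union
    (PySem.Set.ofList ((friendships.filter (fun p => p.1 == 2)).map (fun p => p.2)))
    ((friendships.filter (fun p => p.2 == 2)).map (fun p => p.1))
  let forbidden := friendships.foldl
    (fun fb p =>
      let fb := if p.1 ∈ f2 ∧ p.1 ≠ 1 then PySem.Set.add fb p.2 else fb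
      if p.2 ∈ f2 ∧ p.2 ≠ 1 then PySem.Set.add fb p.1 else fb)
    PySem.Set.empty
  let res := PySem.Set.diff (PySem.Set.diff (PySem.Set.diff f1 f2) forbidden)
    (PySem.Set.ofList [2])
  if res ≠ [] then PySem.List.sorted res (fun x => x) false else [-1]

-- ===== PRECONDITION & SPEC =====
def Spec_configureProjectPresentation (n : Int) (friendships : List (Int × Int)) (out : List Int) : Prop := out = configureProjectPresentation_alt n friendships
instance (n : Int) (friendships : List (Int × Int)) (out : List Int) : Decidable (Spec_configureProjectPresentation n friendships out) := by unfold Spec_configureProjectPresentation; infer_instance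

-- ===== CLAIM (what is proved, stated in full; the proofs are below) =====
def Claim_equal_configureProjectPresentation : Prop := ∀ (n : Int) (friendships : List (Int × Int)), Dom_configureProjectPresentation n friendships → Spec_configureProjectPresentation n friendships (configureProjectPresentation n friendships)

-- ===== LEMMAS AND PROOFS =====

-- membership in a stored neighbor set of the built dict = adjacency in the edge list
theorem pvMemBuild (l : List (Int × Int)) (d : PySem.Dict Int (PySem.Set Int)) (v x : Int) :
    x ∈ (l.foldl pvStep d).getD v PySem.Set.empty ↔
      x ∈ d.getD v PySem.Set.empty ∨ ∃ p ∈ l, (p.1 = v ∧ p.2 = x) ∨ (p.2 = v ∧ p.1 = x) := by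
  induction l generalizing d with
  | nil => simp
  | cons p t ih =>
    simp only [List.foldl_cons, ih, pvStep, PySem.Dict.getD_modify, List.mem_cons]
    by_cases h1 : v = p.1 <;> by_cases h2 : v = p.2 <;> by_cases h3 : p.1 = p.2 <;>
      simp_all [PySem.Set.mem_add] <;> aesop

-- every stored neighbor set stays duplicate-free through the build
theorem pvNodupBuild (l : List (Int × Int)) (d : PySem.Dict Int (PySem.Set Int))
    (h : ∀ v, (d.getD v PySem.Set.empty).Nodup) (v : Int) :
    ((l.foldl pvStep d).getD v PySem.Set.empty).Nodup := by
  induction l generalizing d with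
  | nil => exact h v
  | cons p t ih =>
    refine ih _ (fun w => ?_)
    simp only [pvStep, PySem.Dict.getD_modify]
    split_ifs <;> first
      | exact PySem.Set.nodup_add _ _ (h _)
      | exact PySem.Set.nodup_add _ _ (PySem.Set.nodup_add _ _ (h _))
      | exact h _

-- A's subtraction loop over the neighbors of 2
theorem pvSubLoop (N : Int → PySem.Set Int) (l : List Int) (r : PySem.Set Int) (x : Int) :
    x ∈ l.foldl (fun r i => if i ≠ 1 then PySem.Set.diff r (N i) else r) r ↔
      x ∈ r ∧ ∀ i ∈ l, i ≠ 1 → x ∉ N i := by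
  induction l generalizing r with
  | nil => simp
  | cons i t ih =>
    simp only [List.foldl_cons, ih]
    by_cases hi : i = 1 <;> simp [hi, PySem.Set.mem_diff] <;> tauto

theorem pvSubLoopNodup (N : Int → PySem.Set Int) (l : List Int) (r : PySem.Set Int)
    (h : r.Nodup) :
    (l.foldl (fun r i => if i ≠ 1 then PySem.Set.diff r (N i) else r) r).Nodup := by
  induction l generalizing r with
  | nil => exact h
  | cons i t ih =>
    refine ih _ ?_
    dsimp only
    split_ifs
    · exact PySem.Set.nodup_diff _ _ h
    · exact h

-- B's forbidden-building loop
theorem pvFbLoop (f2 : PySem.Set Int) (l : List (Int × Int)) (fb : PySem.Set Int) (x : Int) :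
    x ∈ l.foldl (fun fb p =>
        let fb := if p.1 ∈ f2 ∧ p.1 ≠ 1 then PySem.Set.add fb p.2 else fb
        if p.2 ∈ f2 ∧ p.2 ≠ 1 then PySem.Set.add fb p.1 else fb) fb ↔
      x ∈ fb ∨ ∃ p ∈ l, (p.1 ∈ f2 ∧ p.1 ≠ 1 ∧ p.2 = x) ∨ (p.2 ∈ f2 ∧ p.2 ≠ 1 ∧ p.1 = x) := by
  induction l generalizing fb with
  | nil => simp
  | cons p t ih =>
    simp only [List.foldl_cons, ih, List.mem_cons]
    split_ifs <;> simp_all [PySem.Set.mem_add] <;> aesop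

-- closing step: both results are Nodup lists with the same members, so the two
-- 'sorted if nonempty else [-1]' expressions coincide
theorem pvFinal (ra rb : List Int) (hra : ra.Nodup) (hrb : rb.Nodup)
    (h : ∀ x, x ∈ ra ↔ x ∈ rb) :
    (if ra ≠ [] then PySem.List.sorted ra (fun x => x) false else [-1]) =
      (if rb ≠ [] then PySem.List.sorted rb (fun x => x) false else [-1]) := by
  have hp : ra.Perm rb := (List.perm_ext_iff_of_nodup hra hrb).2 h
  have hs := PySem.List.sorted_eq_sorted_of_perm ra rb (fun x => x) (fun a b hab => hab) hp
  by_cases he : ra = []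
  · subst he
    simp [hp.nil_eq.symm]
  · have hb : rb ≠ [] := fun hbnil => he (by simpa [hbnil] using hp)
    simp [he, hb, hs]

theorem pvMain (n : Int) (friendships : List (Int × Int)) :
    configureProjectPresentation n friendships = configureProjectPresentation_alt n friendships := by
  unfold configureProjectPresentation configureProjectPresentation_alt
  set fs := friendships.foldl pvStep PySem.Dict.empty with hfs
  have hN : ∀ v x, x ∈ fs.getD v PySem.Set.empty ↔
      ∃ p ∈ friendships, (p.1 = v ∧ p.2 = x) ∨ (p.2 = v ∧ p.1 = x) := by
    intro v x
    rw [hfs, pvMemBuild]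
    simp [PySem.Dict.getD_empty, PySem.Set.empty]
  have hNnd : ∀ v, (fs.getD v PySem.Set.empty).Nodup := by
    intro v
    rw [hfs]
    exact pvNodupBuild _ _ (fun w => by simp [PySem.Dict.getD_empty, PySem.Set.empty]) v
  have hf1 : ∀ x, (x ∈ PySem.Set.union
      (PySem.Set.ofList ((friendships.filter (fun p => p.1 == 1)).map (fun p => p.2)))
      ((friendships.filter (fun p => p.2 == 1)).map (fun p => p.1))) ↔
      x ∈ fs.getD 1 PySem.Set.empty := by
    intro x
    rw [hN]
    simp [PySem.Set.mem_union, PySem.Set.mem_ofList, List.mem_map, List.mem_filter]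
    aesop
  have hf2 : ∀ x, (x ∈ PySem.Set.union
      (PySem.Set.ofList ((friendships.filter (fun p => p.1 == 2)).map (fun p => p.2)))
      ((friendships.filter (fun p => p.2 == 2)).map (fun p => p.1))) ↔
      x ∈ fs.getD 2 PySem.Set.empty := by
    intro x
    rw [hN]
    simp [PySem.Set.mem_union, PySem.Set.mem_ofList, List.mem_map, List.mem_filter]
    aesop
  apply pvFinal
  · exact pvSubLoopNodup _ _ _ (PySem.Set.nodup_diff _ _ (by
      split_ifs
      · exact PySem.Set.nodup_discard _ _ (PySem.Set.nodup_ofList _)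
      · exact PySem.Set.nodup_ofList _))
  · exact PySem.Set.nodup_diff _ _ (PySem.Set.nodup_diff _ _ (PySem.Set.nodup_diff _ _
      (PySem.Set.nodup_union _ _ (PySem.Set.nodup_ofList _))))
  · intro x
    rw [pvSubLoop (fun i => fs.getD i PySem.Set.empty)]
    simp only [PySem.Set.mem_diff, pvFbLoop]
    have hdisc : ∀ (r : PySem.Set Int),
        (x ∈ if PySem.Set.contains r 2 then PySem.Set.discard r 2 else r) ↔ x ∈ r ∧ x ≠ 2 := by
      intro r
      by_cases hc : PySem.Set.contains r 2 = true
      · have h2 := (PySem.Set.contains_iff r 2).1 hc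
        simp [h2, PySem.Set.mem_discard]
      · have h2 : (2 : Int) ∉ r := fun hm => hc ((PySem.Set.contains_iff r 2).2 hm)
        simp only [PySem.Set.contains_eq_listContains, List.contains_eq_mem,
          decide_eq_true_eq, h2, if_neg, not_false_iff]
        constructor
        · exact fun hx => ⟨hx, fun he => h2 (he ▸ hx)⟩
        · exact And.left
    rw [hdisc]
    have key : (∀ i ∈ fs.getD 2 PySem.Set.empty, i ≠ 1 → x ∉ fs.getD i PySem.Set.empty) ↔
        ¬ ∃ p ∈ friendships,
          (p.1 ∈ PySem.Set.union
              (PySem.Set.ofList ((friendships.filter (fun p => p.1 == 2)).map (fun p => p.2)))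
              ((friendships.filter (fun p => p.2 == 2)).map (fun p => p.1)) ∧ p.1 ≠ 1 ∧ p.2 = x) ∨
          (p.2 ∈ PySem.Set.union
              (PySem.Set.ofList ((friendships.filter (fun p => p.1 == 2)).map (fun p => p.2)))
              ((friendships.filter (fun p => p.2 == 2)).map (fun p => p.1)) ∧ p.2 ≠ 1 ∧ p.1 = x) := by
      constructor
      · rintro h ⟨p, hp, hcase⟩
        rcases hcase with ⟨h2, h1, hx⟩ | ⟨h2, h1, hx⟩
        · exact h p.1 ((hf2 _).1 h2) h1 ((hN _ _).2 ⟨p, hp, Or.inl ⟨rfl, hx⟩⟩)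
        · exact h p.2 ((hf2 _).1 h2) h1 ((hN _ _).2 ⟨p, hp, Or.inr ⟨rfl, hx⟩⟩)
      · intro h i hiN2 hi1 hxNi
        rcases (hN i x).1 hxNi with ⟨p, hp, ⟨e1, e2⟩ | ⟨e1, e2⟩⟩
        · exact h ⟨p, hp, Or.inl ⟨(hf2 _).2 (e1 ▸ hiN2), e1 ▸ hi1, e2⟩⟩
        · exact h ⟨p, hp, Or.inr ⟨(hf2 _).2 (e1 ▸ hiN2), e1 ▸ hi1, e2⟩⟩
    rw [key]
    simp only [hf1, hf2, PySem.Set.mem_ofList, List.mem_singleton,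
      PySem.Set.empty, List.not_mem_nil, false_or]
    tauto

-- ===== VERDICT (by name: the statement is the Claim_ definition above) =====
theorem configureProjectPresentation_spec : Claim_equal_configureProjectPresentation := by
  intro n friendships _
  unfold Spec_configureProjectPresentation
  exact pvMain n friendships
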